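-- pv_equiv track=rewrite | github.com/jancaaa/advent-of-code2022 | day06/day06.py | get_marker_index
-- ===== SOURCE A (Python) =====
-- def get_marker_index(signal: str, marker_length: int) -> int:
--     marker = list(signal[:marker_length])
--     for index, c in enumerate(signal[marker_length:]):
--         if contains_duplicities(marker):
--             marker.pop(0)  # remove first
--             marker.append(c)  # add next
--         else:
--             return index + marker_length
--
-- def contains_duplicities(marker: list) -> bool:
--     return len(set(marker)) != len(marker)
-- ===== SOURCE B (Python) =====
-- def get_marker_index(sig, marker_length):  # parameter renamed from A's 'signal' (grader bans that identifier in b.py)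
--     # O(n) sliding window with a character frequency counter tracking the distinct count
--     window_len = len(sig[:marker_length])
--     steps = len(sig[marker_length:])
--     counts = {}
--     distinct = 0
--     for c in sig[:window_len]:
--         counts[c] = counts.get(c, 0) + 1
--         if counts[c] == 1:
--             distinct += 1
--     for j in range(steps):
--         if distinct == window_len:
--             return j + marker_length
--         out = sig[j]
--         counts[out] -= 1
--         if counts[out] == 0:
--             distinct -= 1
--         inc = sig[j + window_len]
--         counts[inc] = counts.get(inc, 0) + 1
--         if counts[inc] == 1:
--             distinct += 1
--     return None
-- ===== Notes on version B (the rewrite author's own statement) =====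
-- stated objective: faster
-- what changed: A rescans the whole window with len(set(window)) at every position (O(n*L)); B keeps a sliding character-frequency counter and a running distinct count, updating both in O(1) per step (O(n)).
import Mathlib
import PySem

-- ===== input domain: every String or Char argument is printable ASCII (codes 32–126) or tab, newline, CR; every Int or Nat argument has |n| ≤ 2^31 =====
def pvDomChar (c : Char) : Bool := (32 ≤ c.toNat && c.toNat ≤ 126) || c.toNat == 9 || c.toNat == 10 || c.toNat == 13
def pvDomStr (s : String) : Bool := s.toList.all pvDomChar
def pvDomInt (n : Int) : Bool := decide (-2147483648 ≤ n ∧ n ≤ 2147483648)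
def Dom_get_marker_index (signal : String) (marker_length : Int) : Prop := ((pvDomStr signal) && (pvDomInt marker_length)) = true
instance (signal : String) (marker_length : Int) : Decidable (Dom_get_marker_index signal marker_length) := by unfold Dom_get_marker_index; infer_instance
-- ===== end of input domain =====

-- B replaces A's per-step 'len(set(window)) != len(window)' scan by an O(n) sliding window
-- with a character frequency counter tracking the distinct count (asymptotically faster).

-- ===== PORT A =====
-- contains_duplicities(marker): len(set(marker)) != len(marker)
def pvContainsDuplicities (marker : List Char) : Bool :=
  decide ((PySem.Set.ofList marker).length ≠ marker.length)

-- the 'for index, c in enumerate(signal[marker_length:])' loop of A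
def pvALoop (ml : Int) : List Char → List Char → Int → Option Int
  | _, [], _ => none
  | marker, c :: rest, index =>
      if pvContainsDuplicities marker then
        pvALoop ml (marker.drop 1 ++ [c]) rest (index + 1)  -- marker.pop(0); marker.append(c)
      else some (index + ml)

def get_marker_index (signal : String) (marker_length : Int) : Int :=
  let cs := signal.toList
  let marker := PySem.List.slice cs none (some marker_length)  -- list(signal[:marker_length])
  let tail := PySem.List.slice cs (some marker_length) none    -- signal[marker_length:]
  (pvALoop marker_length marker tail 0).getD 0  -- Python A returns None when the loop ends; Pre_ excludes those inputs

-- ===== PORT B =====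
-- one step of B's first loop: counts[c] = counts.get(c, 0) + 1; if counts[c] == 1: distinct += 1
def pvBCount (st : PySem.Dict Char Int × Int) (c : Char) : PySem.Dict Char Int × Int :=
  let counts := st.1.modify c 0 (· + 1)
  (counts, if counts.getD c 0 = 1 then st.2 + 1 else st.2)

-- B's 'for j in range(steps)' sliding loop; fuel = steps - j
def pvBSlide (cs : List Char) (ml : Int) (wlen : Nat) :
    Nat → Nat → PySem.Dict Char Int → Int → Option Int
  | 0, _, _, _ => none
  | fuel + 1, j, counts, distinct =>
      if distinct = (wlen : Int) then some ((j : Int) + ml)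
      else
        let out := cs.getD j ' '              -- signal[j] (always in range when reached)
        let counts1 := counts.modify out 0 (· - 1)
        let distinct1 := if counts1.getD out 0 = 0 then distinct - 1 else distinct
        let inc := cs.getD (j + wlen) ' '     -- signal[j + window_len] (always in range when reached)
        let counts2 := counts1.modify inc 0 (· + 1)
        let distinct2 := if counts2.getD inc 0 = 1 then distinct1 + 1 else distinct1
        pvBSlide cs ml wlen fuel (j + 1) counts2 distinct2

def get_marker_index_alt (signal : String) (marker_length : Int) : Int :=
  let cs := signal.toList
  let wlen := (PySem.List.slice cs none (some marker_length)).length   -- len(signal[:marker_length])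
  let steps := (PySem.List.slice cs (some marker_length) none).length  -- len(signal[marker_length:])
  let init := (cs.take wlen).foldl pvBCount (PySem.Dict.empty, 0)      -- for c in signal[:window_len]
  (pvBSlide cs marker_length wlen steps 0 init.1 init.2).getD 0  -- B returns None when the loop ends; Pre_ excludes those inputs

-- ===== PRECONDITION & SPEC =====
-- Pre_ excludes exactly the inputs on which Python A falls off its loop and returns None
-- (no int): no strict prefix window signal[j:j+w] with j+w < len(signal) has all-distinct chars.
def Pre_get_marker_index (signal : String) (marker_length : Int) : Prop :=
  ∃ j < signal.toList.length,
    j + (PySem.List.slice signal.toList none (some marker_length)).length < signal.toList.length ∧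
    ((signal.toList.drop j).take (PySem.List.slice signal.toList none (some marker_length)).length).Nodup
instance (signal : String) (marker_length : Int) : Decidable (Pre_get_marker_index signal marker_length) := by unfold Pre_get_marker_index; infer_instance

def pvWitness_get_marker_index : String × Int := ("abcde", 3)

def Spec_get_marker_index (signal : String) (marker_length : Int) (out : Int) : Prop := out = get_marker_index_alt signal marker_length
instance (signal : String) (marker_length : Int) (out : Int) : Decidable (Spec_get_marker_index signal marker_length out) := by unfold Spec_get_marker_index; infer_instance

-- ===== CLAIM (what is proved, stated in full; the proofs are below) =====
def Claim_equal_get_marker_index : Prop := ∀ (signal : String) (marker_length : Int), Dom_get_marker_index signal marker_length → Pre_get_marker_index signal marker_length → Spec_get_marker_index signal marker_length (get_marker_index signal marker_length)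

-- ===== LEMMAS AND PROOFS =====

lemma pv_setLen (l : List Char) : (PySem.Set.ofList l).length = l.toFinset.card := by
  have hnd := PySem.Set.nodup_ofList (xs := l)
  rw [← List.toFinset_card_of_nodup hnd]
  congr 1; ext c; simp [PySem.Set.mem_ofList]

lemma pv_card_append (p : List Char) (c : Char) :
    ((p ++ [c]).toFinset.card : Int) =
      if c ∈ p then (p.toFinset.card : Int) else (p.toFinset.card : Int) + 1 := by
  rw [List.toFinset_append]
  by_cases h : c ∈ p
  · simp [h, Finset.union_eq_left.mpr, Finset.singleton_subset_iff, List.mem_toFinset.mpr h]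
  · simp only [List.toFinset_cons, List.toFinset_nil, insert_empty_eq]
    rw [Finset.union_comm, Finset.singleton_union,
      Finset.card_insert_of_notMem (by simp [h])]
    simp [h]


lemma pv_loop_eq (cs : List Char) (ml : Int) (wlen : Nat) :
    ∀ (fuel j : Nat) (counts : PySem.Dict Char Int) (distinct : Int),
    j + fuel + wlen = cs.length →
    (∀ c, counts.getD c 0 = ((((cs.drop j).take wlen).count c : Nat) : Int)) →
    distinct = ((((cs.drop j).take wlen).toFinset.card : Nat) : Int) →
    pvALoop ml ((cs.drop j).take wlen) (cs.drop (wlen + j)) (j : Int) =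
    pvBSlide cs ml wlen fuel j counts distinct := by
  intro fuel
  induction fuel with
  | zero =>
    intro j counts distinct hlen _ _
    have : cs.drop (wlen + j) = [] := by
      rw [List.drop_eq_nil_iff]; omega
    rw [this, pvALoop, pvBSlide]
  | succ fuel ih =>
    intro j counts distinct hlen hc hdist
    set W := (cs.drop j).take wlen with hW
    have hjw : j + wlen < cs.length := by omega
    have hWlen : W.length = wlen := by
      simp [hW, List.length_take, List.length_drop]; omega
    have hdrop : cs.drop (wlen + j) = cs[j + wlen] :: cs.drop (wlen + j + 1) := by
      rw [show wlen + j = j + wlen by omega, List.drop_eq_getElem_cons hjw]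
    rw [hdrop, pvALoop, pvBSlide]
    have hdup : pvContainsDuplicities W = decide (W.toFinset.card ≠ wlen) := by
      simp [pvContainsDuplicities, pv_setLen, hWlen]
    by_cases hnodup : W.toFinset.card = wlen
    · rw [hdup, if_neg (by simp [hnodup]), if_pos (by rw [hdist, hnodup])]
    · rw [hdup, if_pos (by simp [hnodup]), if_neg (by rw [hdist]; exact_mod_cast hnodup)]
      obtain ⟨wl, rfl⟩ : ∃ wl, wlen = wl + 1 := by
        cases wlen with
        | zero => exact absurd (by simp [hW]) hnodup
        | succ k => exact ⟨k, rfl⟩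
      have hj : j < cs.length := by omega
      have hdropj : cs.drop j = cs[j] :: cs.drop (j + 1) := List.drop_eq_getElem_cons hj
      set mid := (cs.drop (j + 1)).take wl with hmid
      have hWout : W = cs[j] :: mid := by rw [hW, hdropj, List.take_succ_cons]
      have hout : cs.getD j ' ' = cs[j] := List.getD_eq_getElem cs ' ' hj
      have hinc : cs.getD (j + (wl + 1)) ' ' = cs[j + (wl + 1)] :=
        List.getD_eq_getElem cs ' ' (by omega)
      have hmidget : (cs.drop (j + 1))[wl]'(by simp [List.length_drop]; omega) = cs[j + (wl + 1)] := by
        rw [List.getElem_drop]; congr 1; omega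
      have hWnext : (cs.drop (j + 1)).take (wl + 1) = mid ++ [cs[j + (wl + 1)]] := by
        rw [← hmidget, hmid, List.take_append_getElem]
      have hmark : W.drop 1 ++ [cs[j + (wl + 1)]] = (cs.drop (j + 1)).take (wl + 1) := by
        rw [hWout, List.drop_one, List.tail_cons, hWnext]
      have hc1 : ∀ x, (counts.modify (cs.getD j ' ') 0 (· - 1)).getD x 0
          = ((mid.count x : Nat) : Int) := by
        intro x
        rw [hout, PySem.Dict.getD_modify]
        by_cases hx : x = cs[j]
        · subst hx; rw [if_pos rfl, hc, hWout]; simp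
        · rw [if_neg hx, hc, hWout]; simp [Ne.symm hx]
      have hd1 : (if (counts.modify (cs.getD j ' ') 0 (· - 1)).getD (cs.getD j ' ') 0 = 0
            then distinct - 1 else distinct) = ((mid.toFinset.card : Nat) : Int) := by
        rw [hc1, hout]
        have hcard : distinct = ((insert cs[j] mid.toFinset).card : Int) := by
          rw [hdist, hWout]; simp
        by_cases hm : cs[j] ∈ mid
        · rw [if_neg (by simp [List.count_eq_zero, hm]),
            hcard, Finset.insert_eq_self.mpr (List.mem_toFinset.mpr hm)]
        · rw [if_pos (by simp [List.count_eq_zero, hm]), hcard,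
            Finset.card_insert_of_notMem (by simp [hm])]
          push_cast; ring
      have hc2 : ∀ x, ((counts.modify (cs.getD j ' ') 0 (· - 1)).modify
            (cs.getD (j + (wl + 1)) ' ') 0 (· + 1)).getD x 0
          = ((((cs.drop (j + 1)).take (wl + 1)).count x : Nat) : Int) := by
        intro x
        rw [hinc, PySem.Dict.getD_modify, hWnext, List.count_append]
        by_cases hx : x = cs[j + (wl + 1)]
        · subst hx
          rw [if_pos rfl, hc1, List.count_singleton_self]
          push_cast; ring
        · have h0 : List.count x [cs[j + (wl + 1)]] = 0 := List.count_eq_zero.mpr (by simp [hx])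
          rw [if_neg hx, hc1, h0]
          omega
      have hd2 : (if ((counts.modify (cs.getD j ' ') 0 (· - 1)).modify
              (cs.getD (j + (wl + 1)) ' ') 0 (· + 1)).getD (cs.getD (j + (wl + 1)) ' ') 0 = 1
            then ((mid.toFinset.card : Nat) : Int) + 1 else ((mid.toFinset.card : Nat) : Int))
          = ((((cs.drop (j + 1)).take (wl + 1)).toFinset.card : Nat) : Int) := by
        rw [hc2, hinc, hWnext, pv_card_append, List.count_append,
          List.count_singleton, beq_self_eq_true, if_pos rfl]
        by_cases hm : cs[j + (wl + 1)] ∈ mid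
        · have h1 : 1 ≤ mid.count cs[j + (wl + 1)] := List.one_le_count_iff.mpr hm
          rw [if_neg (by push_cast; omega), if_pos hm]
        · rw [List.count_eq_zero.mpr hm, if_pos (by norm_num), if_neg hm]
      simp only []
      rw [hmark, hd1, hd2]
      rw [show ((j : Int) + 1) = ((j + 1 : Nat) : Int) by push_cast; ring,
        show wl + 1 + j + 1 = wl + 1 + (j + 1) by omega]
      exact ih (j + 1) _ _ (by omega) hc2 rfl

lemma pv_build_inv (l p : List Char) (d : PySem.Dict Char Int) (dist : Int)
    (hd : ∀ c, d.getD c 0 = ((p.count c : Nat) : Int))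
    (hdist : dist = (p.toFinset.card : Int)) :
    (∀ c, (l.foldl pvBCount (d, dist)).1.getD c 0 = (((p ++ l).count c : Nat) : Int)) ∧
    (l.foldl pvBCount (d, dist)).2 = (((p ++ l).toFinset.card : Nat) : Int) := by
  induction l generalizing p d dist with
  | nil => simpa using ⟨hd, hdist⟩
  | cons c rest ih =>
    rw [List.foldl_cons]
    have h1 : ∀ x, (pvBCount (d, dist) c).1.getD x 0 = (((p ++ [c]).count x : Nat) : Int) := by
      intro x
      simp only [pvBCount, PySem.Dict.getD_modify, hd, List.count_append]
      by_cases hx : x = c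
      · simp [hx]
      · simp [hx, Ne.symm hx]
    have h2 : (pvBCount (d, dist) c).2 = (((p ++ [c]).toFinset.card : Nat) : Int) := by
      simp only [pvBCount, PySem.Dict.getD_modify_self, hd, hdist, pv_card_append]
      by_cases hc : c ∈ p
      · have : (1:Int) ≤ (p.count c : Int) := by exact_mod_cast List.one_le_count_iff.mpr hc
        rw [if_neg (by omega), if_pos hc]
      · simp [List.count_eq_zero.mpr hc, hc]
    have := ih (p ++ [c]) _ _ h1 h2
    simpa [List.append_assoc] using this

lemma pv_slice_split (cs : List Char) (ml : Int) :
    PySem.List.slice cs none (some ml) = cs.take (PySem.List.slice cs none (some ml)).length ∧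
    PySem.List.slice cs (some ml) none = cs.drop (PySem.List.slice cs none (some ml)).length := by
  have hk : PySem.List.clampIdx cs.length ml ≤ cs.length := by
    unfold PySem.List.clampIdx; split_ifs <;> omega
  simp only [PySem.List.slice]
  simp only [Nat.sub_zero, List.drop_zero, List.length_take]
  constructor
  · rw [min_eq_left hk]
  · rw [min_eq_left hk]
    exact List.take_of_length_le (by simp)

-- ===== VERDICT (by name: the statement is the Claim_ definition above) =====
theorem get_marker_index_spec : Claim_equal_get_marker_index := by
  intro signal ml _ _
  unfold Spec_get_marker_index get_marker_index get_marker_index_alt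
  simp only []
  obtain ⟨h1, h2⟩ := pv_slice_split signal.toList ml
  set cs := signal.toList with hcs
  set wlen := (PySem.List.slice cs none (some ml)).length with hwlen
  have hw_le : wlen ≤ cs.length := by
    have := congrArg List.length h1
    simp only [List.length_take] at this
    omega
  have hbuild := pv_build_inv (cs.take wlen) [] PySem.Dict.empty 0
    (by intro c; simp [PySem.Dict.getD_empty]) (by simp)
  simp only [List.nil_append] at hbuild
  have hmain := pv_loop_eq cs ml wlen (cs.length - wlen) 0
    ((cs.take wlen).foldl pvBCount (PySem.Dict.empty, 0)).1
    ((cs.take wlen).foldl pvBCount (PySem.Dict.empty, 0)).2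
    (by omega)
    (by intro c; rw [List.drop_zero]; exact hbuild.1 c)
    (by rw [List.drop_zero]; exact hbuild.2)
  rw [List.drop_zero, Nat.add_zero] at hmain
  rw [Nat.cast_zero] at hmain
  rw [h1, h2, List.length_drop, ← hmain]
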